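-- pv_equiv track=rewrite | github.com/cntovas1/bookshelf-format-webapp | python_backend/app.py | calculate_net_hpwl
-- ===== SOURCE A (Python) =====
-- def calculate_net_hpwl(net, placements):
--
--     valid_nodes = [node for node in net['nodes'] if node in placements]
--
--     if len(valid_nodes) < 2:
--         return 0
--
--     min_x = min(placements[node]['x'] for node in valid_nodes)
--     max_x = max(placements[node]['x'] for node in valid_nodes)
--     min_y = min(placements[node]['y'] for node in valid_nodes)
--     max_y = max(placements[node]['y'] for node in valid_nodes)
--
--     hpwl = (max_x - min_x) + (max_y - min_y)
--     return hpwl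
-- ===== SOURCE B (Python) =====
-- def calculate_net_hpwl(net, placements):
--     nodes = net['nodes']
--     if sum(1 for node in nodes if node in placements) < 2:
--         return 0
--     extremes = None  # (min_x, max_x, min_y, max_y)
--     for node in nodes:
--         if node in placements:
--             p = placements[node]
--             x = p['x']
--             y = p['y']
--             if extremes is None:
--                 extremes = (x, x, y, y)
--             else:
--                 mnx, mxx, mny, mxy = extremes
--                 extremes = (min(mnx, x), max(mxx, x), min(mny, y), max(mxy, y))
--     mnx, mxx, mny, mxy = extremes
--     return (mxx - mnx) + (mxy - mny)
-- ===== Notes on version B (the rewrite author's own statement) =====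
-- stated objective: alternative
-- what changed: replaces A's intermediate valid-node list plus four separate min/max generator reductions with a quick membership count followed by one combined fold maintaining all four running extremes in a single tuple
import Mathlib
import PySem

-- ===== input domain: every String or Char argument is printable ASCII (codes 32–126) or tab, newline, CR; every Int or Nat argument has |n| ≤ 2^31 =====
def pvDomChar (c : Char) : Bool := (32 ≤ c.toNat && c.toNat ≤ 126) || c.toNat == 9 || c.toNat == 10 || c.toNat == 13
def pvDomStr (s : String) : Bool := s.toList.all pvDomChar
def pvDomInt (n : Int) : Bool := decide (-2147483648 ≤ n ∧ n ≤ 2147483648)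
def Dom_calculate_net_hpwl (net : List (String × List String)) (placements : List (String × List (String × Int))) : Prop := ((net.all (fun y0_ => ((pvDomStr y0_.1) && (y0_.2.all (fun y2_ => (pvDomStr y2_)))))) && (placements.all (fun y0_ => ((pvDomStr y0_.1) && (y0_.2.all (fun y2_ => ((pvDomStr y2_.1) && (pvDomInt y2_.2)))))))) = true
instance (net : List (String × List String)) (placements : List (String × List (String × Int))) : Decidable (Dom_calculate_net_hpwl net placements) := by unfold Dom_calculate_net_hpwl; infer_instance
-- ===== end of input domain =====

-- B counts placed nodes first, then folds once over net['nodes'] keeping all four running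
-- extremes in one tuple, instead of A's valid-node list plus four separate min/max reductions;
-- same cost, different decomposition.


-- shared accessors for the Python expressions net['nodes'], `node in placements`, placements[node][c]
-- (the getD defaults stand for KeyError, unreachable inside Pre_)
def pvNodes (net : List (String × List String)) : List String :=
  ((PySem.Dict.mk net).get? "nodes").getD []

def pvIn (placements : List (String × List (String × Int))) (node : String) : Bool :=
  (PySem.Dict.mk placements).contains node

def pvCoord (placements : List (String × List (String × Int))) (node : String) (c : String) : Int :=
  ((PySem.Dict.mk (((PySem.Dict.mk placements).get? node).getD [])).get? c).getD 0

-- ===== PORT A =====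
def calculate_net_hpwl (net : List (String × List String)) (placements : List (String × List (String × Int))) : Int :=
  let valid_nodes := (pvNodes net).filter (fun node => pvIn placements node)
  if valid_nodes.length < 2 then 0
  else
    let min_x := (PySem.List.min? (valid_nodes.map (fun node => pvCoord placements node "x")) (fun v => v)).getD 0
    let max_x := (PySem.List.max? (valid_nodes.map (fun node => pvCoord placements node "x")) (fun v => v)).getD 0
    let min_y := (PySem.List.min? (valid_nodes.map (fun node => pvCoord placements node "y")) (fun v => v)).getD 0
    let max_y := (PySem.List.max? (valid_nodes.map (fun node => pvCoord placements node "y")) (fun v => v)).getD 0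
    (max_x - min_x) + (max_y - min_y)

-- ===== PORT B =====
-- loop body of Source B: extremes = none | some (min_x, max_x, min_y, max_y)
def hpwlStep (placements : List (String × List (String × Int)))
    (s : Option (Int × Int × Int × Int)) (node : String) : Option (Int × Int × Int × Int) :=
  if pvIn placements node then
    let x := pvCoord placements node "x"
    let y := pvCoord placements node "y"
    match s with
    | none => some (x, x, y, y)
    | some (mnx, mxx, mny, mxy) => some (min mnx x, max mxx x, min mny y, max mxy y)
  else s

def calculate_net_hpwl_alt (net : List (String × List String)) (placements : List (String × List (String × Int))) : Int :=
  let nodes := pvNodes net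
  if ((nodes.filter (fun node => pvIn placements node)).length) < 2 then 0
  else
    match nodes.foldl (hpwlStep placements) none with
    | some (mnx, mxx, mny, mxy) => (mxx - mnx) + (mxy - mny)
    | none => 0   -- unreachable: the count guard ensures at least one placed node

-- ===== PRECONDITION & SPEC =====
-- Pre_ excludes exactly the inputs where A raises KeyError: net lacks a 'nodes' key, or at least
-- two of the listed nodes are placed and some placed listed node's dict lacks 'x' or 'y'.
def Pre_calculate_net_hpwl (net : List (String × List String)) (placements : List (String × List (String × Int))) : Prop :=
  ((PySem.Dict.mk net).contains "nodes"
    && (decide (((pvNodes net).filter (fun node => pvIn placements node)).length < 2)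
        || (pvNodes net).all (fun node =>
             (((PySem.Dict.mk placements).get? node).map (fun p =>
                (PySem.Dict.mk p).contains "x" && (PySem.Dict.mk p).contains "y")).getD true))) = true
instance (net : List (String × List String)) (placements : List (String × List (String × Int))) : Decidable (Pre_calculate_net_hpwl net placements) := by unfold Pre_calculate_net_hpwl; infer_instance

def pvWitness_calculate_net_hpwl : (List (String × List String)) × (List (String × List (String × Int))) :=
  ([("nodes", ["a", "b"])], [("a", [("x", 0), ("y", 0)]), ("b", [("x", 3), ("y", 4)])])

def Spec_calculate_net_hpwl (net : List (String × List String)) (placements : List (String × List (String × Int))) (out : Int) : Prop := out = calculate_net_hpwl_alt net placements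
instance (net : List (String × List String)) (placements : List (String × List (String × Int))) (out : Int) : Decidable (Spec_calculate_net_hpwl net placements out) := by unfold Spec_calculate_net_hpwl; infer_instance

-- ===== CLAIM (what is proved, stated in full; the proofs are below) =====
def Claim_equal_calculate_net_hpwl : Prop := ∀ (net : List (String × List String)) (placements : List (String × List (String × Int))), Dom_calculate_net_hpwl net placements → Pre_calculate_net_hpwl net placements → Spec_calculate_net_hpwl net placements (calculate_net_hpwl net placements)

-- ===== LEMMAS AND PROOFS =====
lemma foldl_hpwl_seed (placements : List (String × List (String × Int))) (l : List String) :
    ∀ (mnx mxx mny mxy : Int),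
    l.foldl (hpwlStep placements) (some (mnx, mxx, mny, mxy)) =
    some ((l.filter (fun n => pvIn placements n)).foldl (fun m n => min m (pvCoord placements n "x")) mnx,
          (l.filter (fun n => pvIn placements n)).foldl (fun m n => max m (pvCoord placements n "x")) mxx,
          (l.filter (fun n => pvIn placements n)).foldl (fun m n => min m (pvCoord placements n "y")) mny,
          (l.filter (fun n => pvIn placements n)).foldl (fun m n => max m (pvCoord placements n "y")) mxy) := by
  induction l with
  | nil => intro mnx mxx mny mxy; simp
  | cons n t ih =>
    intro mnx mxx mny mxy
    by_cases h : pvIn placements n = true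
    · simp only [List.foldl_cons, List.filter_cons, h, if_true, hpwlStep]
      exact ih _ _ _ _
    · simp only [List.foldl_cons, List.filter_cons, h, hpwlStep, if_false, Bool.false_eq_true]
      exact ih mnx mxx mny mxy

lemma foldl_hpwl_none (placements : List (String × List (String × Int))) (l : List String) :
    l.foldl (hpwlStep placements) none =
    match l.filter (fun n => pvIn placements n) with
    | [] => none
    | v :: vt =>
      some (vt.foldl (fun m n => min m (pvCoord placements n "x")) (pvCoord placements v "x"),
            vt.foldl (fun m n => max m (pvCoord placements n "x")) (pvCoord placements v "x"),
            vt.foldl (fun m n => min m (pvCoord placements n "y")) (pvCoord placements v "y"),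
            vt.foldl (fun m n => max m (pvCoord placements n "y")) (pvCoord placements v "y")) := by
  induction l with
  | nil => simp
  | cons n t ih =>
    by_cases h : pvIn placements n = true
    · simp only [List.foldl_cons, List.filter_cons, h, if_true, hpwlStep]
      exact foldl_hpwl_seed placements t _ _ _ _
    · simp only [List.foldl_cons, List.filter_cons, h, hpwlStep, if_false, Bool.false_eq_true]
      exact ih

-- ===== VERDICT (by name: the statement is the Claim_ definition above) =====
theorem calculate_net_hpwl_spec : Claim_equal_calculate_net_hpwl := by
  intro net placements _hdom _hpre
  unfold Spec_calculate_net_hpwl calculate_net_hpwl calculate_net_hpwl_alt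
  simp only [foldl_hpwl_none]
  rcases hv : (pvNodes net).filter (fun n => pvIn placements n) with _ | ⟨v, vt⟩
  · simp
  · rcases vt with _ | ⟨w, wt⟩
    · norm_num
    · have hlen : ¬ ((v :: w :: wt).length < 2) := by simp
      simp only [hlen, if_false, List.map_cons,
        PySem.List.min?_id_cons, PySem.List.max?_id_cons, Option.getD_some,
        List.foldl_cons, List.foldl_map]
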